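-- pv_equiv track=rewrite | github.com/pgedelman/Block-Smash | smash-bot/training/train_model_helper.py | find_sa_and_holes
-- ===== SOURCE A (Python) =====
-- def find_sa_and_holes(grid):
--         n = len(grid)
--         m = len(grid[0])
--         surface_area = 0
--         small_holes = 0
--         big_holes = 0
--         big_hole_indexes = [(0, 0), (0, 1), (0, 2), (1, 0), (1, 1), (1, 2), (2, 0), (2, 1), (2, 2)]
--         for i in range(n):
--             for j in range(m):
--                 if grid[i][j] == 1:
--                     if i - 1 >= 0 and grid[i - 1][j] == 0:
--                         surface_area += 1
--                     if i + 1 < n and grid[i + 1][j] == 0: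
--                         surface_area += 1
--                     if j - 1 >= 0 and grid[i][j - 1] == 0:
--                         surface_area += 1
--                     if j + 1 < m and grid[i][j + 1] == 0:
--                         surface_area += 1
--                 else:
--                     if (i - 1 < 0 or grid[i - 1][j] == 1) and (i + 1 >= n or grid[i + 1][j] == 1) and (j - 1 < 0 or grid[i][j - 1] == 1) and (j + 1 >= m or grid[i][j + 1] == 1):
--                         small_holes += 1
--                     if i + 2 < n and j + 2 < m:
--                         if all(grid[i + index[0]][j + index[1]] == 0 for index in big_hole_indexes):
--                             big_holes += 1
--         return surface_area, small_holes, big_holes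
-- ===== SOURCE B (Python) =====
-- def find_sa_and_holes(grid):
--     n = len(grid)
--     m = len(grid[0])
--     # surface area: count adjacent pairs (one filled, one empty); each exposed
--     # interior face is one such pair, boundary faces are never counted.
--     surface_area = 0
--     for i in range(n):
--         for j in range(m - 1):
--             a, b = grid[i][j], grid[i][j + 1]
--             if (a == 1 and b == 0) or (a == 0 and b == 1):
--                 surface_area += 1
--     for i in range(n - 1):
--         for j in range(m):
--             a, b = grid[i][j], grid[i + 1][j]
--             if (a == 1 and b == 0) or (a == 0 and b == 1):
--                 surface_area += 1
--     # small holes: non-filled cells whose every in-grid neighbour is filled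
--     small_holes = 0
--     for i in range(n):
--         for j in range(m):
--             if grid[i][j] != 1:
--                 if (i - 1 < 0 or grid[i - 1][j] == 1) and (i + 1 >= n or grid[i + 1][j] == 1) and (j - 1 < 0 or grid[i][j - 1] == 1) and (j + 1 >= m or grid[i][j + 1] == 1):
--                     small_holes += 1
--     # big holes: all-zero 3x3 windows
--     big_holes = 0
--     for i in range(n - 2):
--         for j in range(m - 2):
--             if all(grid[i + di][j + dj] == 0 for di in range(3) for dj in range(3)):
--                 big_holes += 1
--     return surface_area, small_holes, big_holes
-- ===== Notes on version B (the rewrite author's own statement) =====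
-- stated objective: alternative
-- what changed: Replaces A's single fused per-filled-cell pass with separate passes: surface area is computed by scanning horizontal and vertical adjacent pairs (counting pairs with one filled and one empty cell), small holes by a pass over non-filled cells, and big holes by scanning only the in-range 3x3 windows for all-zeros.
import Mathlib
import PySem

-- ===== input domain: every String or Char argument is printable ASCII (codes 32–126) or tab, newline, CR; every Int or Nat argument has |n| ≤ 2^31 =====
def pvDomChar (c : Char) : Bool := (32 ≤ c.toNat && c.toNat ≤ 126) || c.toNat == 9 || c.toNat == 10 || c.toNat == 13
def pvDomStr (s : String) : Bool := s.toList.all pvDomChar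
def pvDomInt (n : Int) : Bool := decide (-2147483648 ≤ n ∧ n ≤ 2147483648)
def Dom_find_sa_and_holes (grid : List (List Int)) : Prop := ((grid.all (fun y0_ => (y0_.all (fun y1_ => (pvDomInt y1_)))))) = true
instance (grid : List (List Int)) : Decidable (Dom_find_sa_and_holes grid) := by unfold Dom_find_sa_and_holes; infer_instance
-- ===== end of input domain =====

-- B computes the same (surface_area, small_holes, big_holes) by separate passes: surface area
-- via adjacent-pair scans (horizontal then vertical), small holes over non-filled cells, big
-- holes over in-range 3x3 windows; alternative decomposition, same asymptotic cost.


-- ===== PORT A =====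
-- literal transliteration of A: one fused pass over all cells, three accumulators;
-- grid[i][j] is always in range under Pre_, ported as pyGetD.
def find_sa_and_holes (grid : List (List Int)) : Int × Int × Int :=
  let n : Int := PySem.List.len grid
  let m : Int := PySem.List.len (PySem.List.pyGetD grid 0 [])
  let big_hole_indexes : List (Int × Int) := [(0,0),(0,1),(0,2),(1,0),(1,1),(1,2),(2,0),(2,1),(2,2)]
  (PySem.List.pyRange 0 n).foldl (fun s i =>
    (PySem.List.pyRange 0 m).foldl (fun s j =>
      if PySem.List.pyGetD (PySem.List.pyGetD grid i []) j 0 = 1 then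
        let sa := if 0 ≤ i - 1 ∧ PySem.List.pyGetD (PySem.List.pyGetD grid (i-1) []) j 0 = 0 then s.1 + 1 else s.1
        let sa := if i + 1 < n ∧ PySem.List.pyGetD (PySem.List.pyGetD grid (i+1) []) j 0 = 0 then sa + 1 else sa
        let sa := if 0 ≤ j - 1 ∧ PySem.List.pyGetD (PySem.List.pyGetD grid i []) (j-1) 0 = 0 then sa + 1 else sa
        let sa := if j + 1 < m ∧ PySem.List.pyGetD (PySem.List.pyGetD grid i []) (j+1) 0 = 0 then sa + 1 else sa
        (sa, s.2.1, s.2.2)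
      else
        let sh := if (i - 1 < 0 ∨ PySem.List.pyGetD (PySem.List.pyGetD grid (i-1) []) j 0 = 1) ∧
                     (n ≤ i + 1 ∨ PySem.List.pyGetD (PySem.List.pyGetD grid (i+1) []) j 0 = 1) ∧
                     (j - 1 < 0 ∨ PySem.List.pyGetD (PySem.List.pyGetD grid i []) (j-1) 0 = 1) ∧
                     (m ≤ j + 1 ∨ PySem.List.pyGetD (PySem.List.pyGetD grid i []) (j+1) 0 = 1)
                  then s.2.1 + 1 else s.2.1
        let bh := if i + 2 < n ∧ j + 2 < m then
                    (if big_hole_indexes.all (fun idx =>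
                        PySem.List.pyGetD (PySem.List.pyGetD grid (i + idx.1) []) (j + idx.2) 0 == 0)
                     then s.2.2 + 1 else s.2.2)
                  else s.2.2
        (s.1, sh, bh)) s) (0, 0, 0)

-- ===== PORT B =====
-- literal transliteration of B: four separate double loops (horizontal pairs, vertical pairs,
-- small holes, 3x3 windows).
def find_sa_and_holes_alt (grid : List (List Int)) : Int × Int × Int :=
  let n : Int := PySem.List.len grid
  let m : Int := PySem.List.len (PySem.List.pyGetD grid 0 [])
  let sa1 : Int := (PySem.List.pyRange 0 n).foldl (fun acc i =>
    (PySem.List.pyRange 0 (m - 1)).foldl (fun acc j =>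
      let a := PySem.List.pyGetD (PySem.List.pyGetD grid i []) j 0
      let b := PySem.List.pyGetD (PySem.List.pyGetD grid i []) (j+1) 0
      if (a = 1 ∧ b = 0) ∨ (a = 0 ∧ b = 1) then acc + 1 else acc) acc) 0
  let sa2 : Int := (PySem.List.pyRange 0 (n - 1)).foldl (fun acc i =>
    (PySem.List.pyRange 0 m).foldl (fun acc j =>
      let a := PySem.List.pyGetD (PySem.List.pyGetD grid i []) j 0
      let b := PySem.List.pyGetD (PySem.List.pyGetD grid (i+1) []) j 0
      if (a = 1 ∧ b = 0) ∨ (a = 0 ∧ b = 1) then acc + 1 else acc) acc) sa1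
  let sh : Int := (PySem.List.pyRange 0 n).foldl (fun acc i =>
    (PySem.List.pyRange 0 m).foldl (fun acc j =>
      if PySem.List.pyGetD (PySem.List.pyGetD grid i []) j 0 ≠ 1 ∧
         ((i - 1 < 0 ∨ PySem.List.pyGetD (PySem.List.pyGetD grid (i-1) []) j 0 = 1) ∧
          (n ≤ i + 1 ∨ PySem.List.pyGetD (PySem.List.pyGetD grid (i+1) []) j 0 = 1) ∧
          (j - 1 < 0 ∨ PySem.List.pyGetD (PySem.List.pyGetD grid i []) (j-1) 0 = 1) ∧
          (m ≤ j + 1 ∨ PySem.List.pyGetD (PySem.List.pyGetD grid i []) (j+1) 0 = 1))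
      then acc + 1 else acc) acc) 0
  let bh : Int := (PySem.List.pyRange 0 (n - 2)).foldl (fun acc i =>
    (PySem.List.pyRange 0 (m - 2)).foldl (fun acc j =>
      if (PySem.List.pyRange 0 3).all (fun di => (PySem.List.pyRange 0 3).all (fun dj =>
           PySem.List.pyGetD (PySem.List.pyGetD grid (i + di) []) (j + dj) 0 == 0))
      then acc + 1 else acc) acc) 0
  (sa2, sh, bh)

-- ===== PRECONDITION & SPEC =====
-- Pre_ excludes exactly the inputs where the Python A raises IndexError: the empty grid
-- (len(grid[0])) and ragged grids with a row shorter than the first row (grid[i][j], j < m).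
def Pre_find_sa_and_holes (grid : List (List Int)) : Prop :=
  grid ≠ [] ∧ ∀ row ∈ grid, (grid.headD []).length ≤ row.length
instance (grid : List (List Int)) : Decidable (Pre_find_sa_and_holes grid) := by
  unfold Pre_find_sa_and_holes; infer_instance
def pvWitness_find_sa_and_holes : List (List Int) := [[1, 0, 0], [0, 1, 0], [0, 0, 0]]

def Spec_find_sa_and_holes (grid : List (List Int)) (out : Int × Int × Int) : Prop := out = find_sa_and_holes_alt grid
instance (grid : List (List Int)) (out : Int × Int × Int) : Decidable (Spec_find_sa_and_holes grid out) := by unfold Spec_find_sa_and_holes; infer_instance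

-- ===== CLAIM (what is proved, stated in full; the proofs are below) =====
def Claim_equal_find_sa_and_holes : Prop := ∀ (grid : List (List Int)), Dom_find_sa_and_holes grid → Pre_find_sa_and_holes grid → Spec_find_sa_and_holes grid (find_sa_and_holes grid)

-- ===== LEMMAS AND PROOFS =====

-- the cell accessor both ports use
def G (grid : List (List Int)) (i j : Int) : Int :=
  PySem.List.pyGetD (PySem.List.pyGetD grid i []) j 0

-- double sum over two index ranges
def S2 (N M : Nat) (F : Int → Int → Int) : Int :=
  ∑ i ∈ Finset.range N, ∑ j ∈ Finset.range M, F i j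

-- per-cell contribution of A's fused loop body
def aCell (g : Int → Int → Int) (n m : Int) (i j : Int) : Int × Int × Int :=
  if g i j = 1 then
    ((if 0 ≤ i - 1 ∧ g (i-1) j = 0 then 1 else 0) +
     (if i + 1 < n ∧ g (i+1) j = 0 then 1 else 0) +
     (if 0 ≤ j - 1 ∧ g i (j-1) = 0 then 1 else 0) +
     (if j + 1 < m ∧ g i (j+1) = 0 then 1 else 0), 0, 0)
  else
    (0,
     if (i - 1 < 0 ∨ g (i-1) j = 1) ∧ (n ≤ i + 1 ∨ g (i+1) j = 1) ∧
        (j - 1 < 0 ∨ g i (j-1) = 1) ∧ (m ≤ j + 1 ∨ g i (j+1) = 1) then 1 else 0,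
     if i + 2 < n ∧ j + 2 < m then
       (if ([((0:Int),(0:Int)),(0,1),(0,2),(1,0),(1,1),(1,2),(2,0),(2,1),(2,2)] : List (Int × Int)).all
             (fun idx => g (i + idx.1) (j + idx.2) == 0) then 1 else 0)
     else 0)

-- B-side per-cell summands
def hpC (g : Int → Int → Int) (i j : Int) : Int :=
  if (g i j = 1 ∧ g i (j+1) = 0) ∨ (g i j = 0 ∧ g i (j+1) = 1) then 1 else 0
def vpC (g : Int → Int → Int) (i j : Int) : Int :=
  if (g i j = 1 ∧ g (i+1) j = 0) ∨ (g i j = 0 ∧ g (i+1) j = 1) then 1 else 0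
def shC (g : Int → Int → Int) (n m : Int) (i j : Int) : Int :=
  if g i j ≠ 1 ∧
     ((i - 1 < 0 ∨ g (i-1) j = 1) ∧ (n ≤ i + 1 ∨ g (i+1) j = 1) ∧
      (j - 1 < 0 ∨ g i (j-1) = 1) ∧ (m ≤ j + 1 ∨ g i (j+1) = 1)) then 1 else 0
def bhC (g : Int → Int → Int) (i j : Int) : Int :=
  if (PySem.List.pyRange 0 3).all (fun di => (PySem.List.pyRange 0 3).all (fun dj =>
       g (i + di) (j + dj) == 0)) then 1 else 0

-- a fold whose body adds a per-element triple componentwise is the triple of sums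
theorem foldl_triple {α : Type} (l : List α) (body : (Int × Int × Int) → α → (Int × Int × Int))
    (F : α → Int × Int × Int)
    (hb : ∀ s x, body s x = (s.1 + (F x).1, s.2.1 + (F x).2.1, s.2.2 + (F x).2.2))
    (s : Int × Int × Int) :
    l.foldl body s = (s.1 + (l.map (fun x => (F x).1)).sum,
                      s.2.1 + (l.map (fun x => (F x).2.1)).sum,
                      s.2.2 + (l.map (fun x => (F x).2.2)).sum) := by
  induction l generalizing s with
  | nil => simp
  | cons a t ih =>
    rw [List.foldl_cons, hb, ih]
    simp only [List.map_cons, List.sum_cons, Prod.mk.injEq]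
    refine ⟨by ring, by ring, by ring⟩


theorem sum_map_range_int (N : Nat) (f : Nat → Int) :
    ((List.range N).map f).sum = ∑ k ∈ Finset.range N, f k := by
  induction N with
  | zero => simp
  | succ n ih => simp [List.range_succ, Finset.sum_range_succ, ih]


theorem sum_map_pyRange (b : Int) (f : Int → Int) :
    ((PySem.List.pyRange 0 b).map f).sum = ∑ k ∈ Finset.range b.toNat, f ↑k := by
  rw [PySem.List.pyRange_one, List.map_map, sum_map_range_int]
  simp



-- a counting fold is the sum of 0/1 summands (Prop-valued test, as in port B)
theorem foldl_ite_count {α : Type} (l : List α) (p : α → Prop) [DecidablePred p] (a : Int) :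
    l.foldl (fun acc x => if p x then acc + 1 else acc) a
      = a + (l.map (fun x => if p x then (1:Int) else 0)).sum := by
  induction l generalizing a with
  | nil => simp
  | cons x t ih =>
    rw [List.foldl_cons]
    by_cases h : p x
    · rw [if_pos h, ih]; simp only [List.map_cons, List.sum_cons, if_pos h]; ring
    · rw [if_neg h, ih]; simp only [List.map_cons, List.sum_cons, if_neg h]; ring


theorem foldl2_ite_count (li lj : List Int) (p : Int → Int → Prop) [∀ i j, Decidable (p i j)] (a : Int) :
    li.foldl (fun acc i => lj.foldl (fun acc j => if p i j then acc + 1 else acc) acc) a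
      = a + (li.map (fun i => (lj.map (fun j => if p i j then (1:Int) else 0)).sum)).sum := by
  induction li generalizing a with
  | nil => simp
  | cons x t ih => rw [List.foldl_cons, foldl_ite_count, ih]; simp only [List.map_cons, List.sum_cons]; ring


-- characterisation of port A as a triple of double sums
theorem A_char (grid : List (List Int)) :
    find_sa_and_holes grid =
      (S2 grid.length (PySem.List.pyGetD grid 0 []).length
         (fun i j => (aCell (G grid) grid.length (PySem.List.pyGetD grid 0 []).length i j).1),
       S2 grid.length (PySem.List.pyGetD grid 0 []).length
         (fun i j => (aCell (G grid) grid.length (PySem.List.pyGetD grid 0 []).length i j).2.1),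
       S2 grid.length (PySem.List.pyGetD grid 0 []).length
         (fun i j => (aCell (G grid) grid.length (PySem.List.pyGetD grid 0 []).length i j).2.2)) := by
  unfold find_sa_and_holes
  rw [foldl_triple _ _ (fun i : Int =>
        (((PySem.List.pyRange 0 (PySem.List.len (PySem.List.pyGetD grid 0 []))).map
            (fun j => (aCell (G grid) (PySem.List.len grid) (PySem.List.len (PySem.List.pyGetD grid 0 [])) i j).1)).sum,
         ((PySem.List.pyRange 0 (PySem.List.len (PySem.List.pyGetD grid 0 []))).map
            (fun j => (aCell (G grid) (PySem.List.len grid) (PySem.List.len (PySem.List.pyGetD grid 0 [])) i j).2.1)).sum,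
         ((PySem.List.pyRange 0 (PySem.List.len (PySem.List.pyGetD grid 0 []))).map
            (fun j => (aCell (G grid) (PySem.List.len grid) (PySem.List.len (PySem.List.pyGetD grid 0 [])) i j).2.2)).sum))
      ?hbout]
  case hbout =>
    intro s i
    rw [foldl_triple _ _ (fun j => aCell (G grid) (PySem.List.len grid) (PySem.List.len (PySem.List.pyGetD grid 0 [])) i j) ?hbin]
    case hbin =>
      intro s j
      simp only [G, aCell]
      split_ifs <;> simp <;> ring
  simp only [PySem.List.len_eq, sum_map_pyRange, Int.toNat_natCast, S2]
  simp


-- characterisation of port B as sums of its four passes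
theorem B_char (grid : List (List Int)) :
    find_sa_and_holes_alt grid =
      (S2 grid.length ((PySem.List.pyGetD grid 0 []).length - 1) (hpC (G grid)) +
         S2 (grid.length - 1) (PySem.List.pyGetD grid 0 []).length (vpC (G grid)),
       S2 grid.length (PySem.List.pyGetD grid 0 []).length
         (shC (G grid) grid.length (PySem.List.pyGetD grid 0 []).length),
       S2 (grid.length - 2) ((PySem.List.pyGetD grid 0 []).length - 2) (bhC (G grid))) := by
  have hN1 : ((grid.length : Int) - 1).toNat = grid.length - 1 := by omega
  have hN2 : ((grid.length : Int) - 2).toNat = grid.length - 2 := by omega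
  have hM1 : (((PySem.List.pyGetD grid 0 []).length : Int) - 1).toNat = (PySem.List.pyGetD grid 0 []).length - 1 := by omega
  have hM2 : (((PySem.List.pyGetD grid 0 []).length : Int) - 2).toNat = (PySem.List.pyGetD grid 0 []).length - 2 := by omega
  unfold find_sa_and_holes_alt
  simp only [foldl2_ite_count]
  simp only [PySem.List.len_eq, sum_map_pyRange, Int.toNat_natCast, hN1, hN2, hM1, hM2,
    zero_add, S2, hpC, vpC, shC, bhC, G]
  rfl


-- one-dimensional pair identity: left faces + right faces = differing adjacent pairs
theorem pairs1D (h : Int → Int) (M : Nat) :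
    (∑ j ∈ Finset.range M,
       ((if h ↑j = 1 ∧ 0 ≤ (j : Int) - 1 ∧ h (↑j - 1) = 0 then (1:Int) else 0) +
        (if h ↑j = 1 ∧ (j : Int) + 1 < ↑M ∧ h (↑j + 1) = 0 then 1 else 0)))
    = ∑ j ∈ Finset.range (M - 1),
        (if (h ↑j = 1 ∧ h (↑j + 1) = 0) ∨ (h ↑j = 0 ∧ h (↑j + 1) = 1) then (1:Int) else 0) := by
  cases M with
  | zero => simp
  | succ M' =>
    rw [Finset.sum_add_distrib]
    rw [Finset.sum_range_succ' (fun j => if h ↑j = 1 ∧ 0 ≤ (j : Int) - 1 ∧ h (↑j - 1) = 0 then (1:Int) else 0) M']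
    rw [Finset.sum_range_succ (fun j => if h ↑j = 1 ∧ (j : Int) + 1 < ↑(M' + 1) ∧ h (↑j + 1) = 0 then (1:Int) else 0) M']
    have e0 : (if h ↑(0:Nat) = 1 ∧ 0 ≤ ((0:Nat) : Int) - 1 ∧ h (↑(0:Nat) - 1) = 0 then (1:Int) else 0) = 0 := by
      norm_num
    have eM : (if h ↑M' = 1 ∧ (M' : Int) + 1 < ↑(M' + 1) ∧ h (↑M' + 1) = 0 then (1:Int) else 0) = 0 := by
      have hn : ¬ ((M' : Int) + 1 < ↑(M' + 1)) := by push_cast; omega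
      split_ifs with hcond
      · exact absurd hcond.2.1 hn
      · rfl
    rw [e0, eM, add_zero, add_zero, Nat.add_sub_cancel, ← Finset.sum_add_distrib]
    refine Finset.sum_congr rfl fun j hj => ?_
    have hj' : j < M' := Finset.mem_range.mp hj
    have c1 : ((j + 1 : Nat) : Int) = (j : Int) + 1 := by push_cast; ring
    rw [c1]
    have c2 : (j : Int) + 1 - 1 = (j : Int) := by ring
    rw [c2]
    have hb : ((j : Int) + 1 < ((M' + 1 : Nat) : Int)) := by push_cast; omega
    split_ifs <;> omega


theorem aCell_fst (g : Int → Int → Int) (n m i j : Int) :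
    (aCell g n m i j).1 =
      ((if g i j = 1 ∧ 0 ≤ j - 1 ∧ g i (j-1) = 0 then (1:Int) else 0) +
       (if g i j = 1 ∧ j + 1 < m ∧ g i (j+1) = 0 then 1 else 0)) +
      ((if g i j = 1 ∧ 0 ≤ i - 1 ∧ g (i-1) j = 0 then 1 else 0) +
       (if g i j = 1 ∧ i + 1 < n ∧ g (i+1) j = 0 then 1 else 0)) := by
  by_cases hc : g i j = 1
  · simp only [aCell, hc, true_and]
    split_ifs <;> omega
  · simp only [aCell, if_neg hc]
    split_ifs <;> omega


theorem SA_eq (g : Int → Int → Int) (N M : Nat) :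
    S2 N M (fun i j => (aCell g ↑N ↑M i j).1)
      = S2 N (M - 1) (hpC g) + S2 (N - 1) M (vpC g) := by
  unfold S2
  have rowH : ∀ i : Nat,
      (∑ j ∈ Finset.range M,
         ((if g ↑i ↑j = 1 ∧ 0 ≤ (j : Int) - 1 ∧ g ↑i (↑j - 1) = 0 then (1:Int) else 0) +
          (if g ↑i ↑j = 1 ∧ (j : Int) + 1 < ↑M ∧ g ↑i (↑j + 1) = 0 then 1 else 0)))
        = ∑ j ∈ Finset.range (M - 1), hpC g ↑i ↑j := by
    intro i
    simpa [hpC] using pairs1D (fun x => g ↑i x) M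
  have colV : ∀ j : Nat,
      (∑ i ∈ Finset.range N,
         ((if g ↑i ↑j = 1 ∧ 0 ≤ (i : Int) - 1 ∧ g (↑i - 1) ↑j = 0 then (1:Int) else 0) +
          (if g ↑i ↑j = 1 ∧ (i : Int) + 1 < ↑N ∧ g (↑i + 1) ↑j = 0 then 1 else 0)))
        = ∑ i ∈ Finset.range (N - 1), vpC g ↑i ↑j := by
    intro j
    simpa [vpC] using pairs1D (fun x => g x ↑j) N
  calc ∑ i ∈ Finset.range N, ∑ j ∈ Finset.range M, (aCell g ↑N ↑M ↑i ↑j).1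
      = ∑ i ∈ Finset.range N,
          ((∑ j ∈ Finset.range M,
             ((if g ↑i ↑j = 1 ∧ 0 ≤ (j : Int) - 1 ∧ g ↑i (↑j - 1) = 0 then (1:Int) else 0) +
              (if g ↑i ↑j = 1 ∧ (j : Int) + 1 < ↑M ∧ g ↑i (↑j + 1) = 0 then 1 else 0))) +
           (∑ j ∈ Finset.range M,
             ((if g ↑i ↑j = 1 ∧ 0 ≤ (i : Int) - 1 ∧ g (↑i - 1) ↑j = 0 then (1:Int) else 0) +
              (if g ↑i ↑j = 1 ∧ (i : Int) + 1 < ↑N ∧ g (↑i + 1) ↑j = 0 then 1 else 0)))) := by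
        refine Finset.sum_congr rfl fun i _ => ?_
        rw [← Finset.sum_add_distrib]
        exact Finset.sum_congr rfl fun j _ => aCell_fst g ↑N ↑M ↑i ↑j
    _ = (∑ i ∈ Finset.range N, ∑ j ∈ Finset.range (M - 1), hpC g ↑i ↑j) +
          ∑ i ∈ Finset.range N,
            (∑ j ∈ Finset.range M,
               ((if g ↑i ↑j = 1 ∧ 0 ≤ (i : Int) - 1 ∧ g (↑i - 1) ↑j = 0 then (1:Int) else 0) +
                (if g ↑i ↑j = 1 ∧ (i : Int) + 1 < ↑N ∧ g (↑i + 1) ↑j = 0 then 1 else 0))) := by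
        rw [Finset.sum_add_distrib]
        congr 1
        exact Finset.sum_congr rfl fun i _ => rowH i
    _ = (∑ i ∈ Finset.range N, ∑ j ∈ Finset.range (M - 1), hpC g ↑i ↑j) +
          ∑ j ∈ Finset.range M, ∑ i ∈ Finset.range (N - 1), vpC g ↑i ↑j := by
        congr 1
        rw [Finset.sum_comm]
        exact Finset.sum_congr rfl fun j _ => colV j
    _ = (∑ i ∈ Finset.range N, ∑ j ∈ Finset.range (M - 1), hpC g ↑i ↑j) +
          ∑ i ∈ Finset.range (N - 1), ∑ j ∈ Finset.range M, vpC g ↑i ↑j := by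
        congr 1
        exact Finset.sum_comm


theorem SH_eq (g : Int → Int → Int) (N M : Nat) :
    S2 N M (fun i j => (aCell g ↑N ↑M i j).2.1) = S2 N M (shC g ↑N ↑M) := by
  unfold S2
  refine Finset.sum_congr rfl fun i _ => Finset.sum_congr rfl fun j _ => ?_
  by_cases hc : g ↑i ↑j = 1 <;> simp [aCell, shC, hc]


theorem S2_shrink (N M : Nat) (F : Int → Int → Int)
    (hF : ∀ i j : Nat, ((N : Int) ≤ ↑i + 2 ∨ (M : Int) ≤ ↑j + 2) → F ↑i ↑j = 0) :
    S2 N M F = S2 (N - 2) (M - 2) F := by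
  unfold S2
  rw [← Finset.sum_subset (show Finset.range (N-2) ⊆ Finset.range N from fun x hx => Finset.mem_range.mpr (by have := Finset.mem_range.mp hx; omega))
        (fun i _ hi => Finset.sum_eq_zero fun j _ =>
          hF i j (Or.inl (by simp only [Finset.mem_range] at hi; omega)))]
  refine Finset.sum_congr rfl fun i _ => ?_
  rw [← Finset.sum_subset (show Finset.range (M-2) ⊆ Finset.range M from fun x hx => Finset.mem_range.mpr (by have := Finset.mem_range.mp hx; omega))
        (fun j _ hj => hF i j (Or.inr (by simp only [Finset.mem_range] at hj; omega)))]


theorem BH_eq (g : Int → Int → Int) (N M : Nat) :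
    S2 N M (fun i j => (aCell g ↑N ↑M i j).2.2) = S2 (N - 2) (M - 2) (bhC g) := by
  have hpy3 : PySem.List.pyRange 0 3 = [(0:Int), 1, 2] := by decide
  have step1 : S2 N M (fun i j => (aCell g ↑N ↑M i j).2.2)
      = S2 N M (fun i j => if i + 2 < ↑N ∧ j + 2 < ↑M then bhC g i j else 0) := by
    unfold S2
    refine Finset.sum_congr rfl fun i _ => Finset.sum_congr rfl fun j _ => ?_
    by_cases hc : g ↑i ↑j = 1 <;>
      simp only [aCell, bhC, hpy3, List.all_cons, List.all_nil, Bool.and_true,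
        Bool.and_eq_true, beq_iff_eq, add_zero, hc, if_pos, if_neg,
        not_false_iff] <;>
      split_ifs <;> first | rfl | tauto
  rw [step1]
  rw [S2_shrink N M _ (fun i j h => by
    split_ifs with hb
    · exfalso; omega
    · rfl)]
  unfold S2
  refine Finset.sum_congr rfl fun i hi => Finset.sum_congr rfl fun j hj => ?_
  have hi' := Finset.mem_range.mp hi
  have hj' := Finset.mem_range.mp hj
  dsimp only
  rw [if_pos (by constructor <;> omega : ((i:Int)) + 2 < ↑N ∧ ((j:Int)) + 2 < ↑M)]

-- ===== VERDICT (by name: the statement is the Claim_ definition above) =====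
theorem find_sa_and_holes_spec : Claim_equal_find_sa_and_holes := by
  intro grid _ _
  unfold Spec_find_sa_and_holes
  rw [A_char, B_char, SA_eq, SH_eq, BH_eq]
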